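-- pv_equiv track=rewrite | github.com/SantiagoMercurio/Binary-and-Decimal-Calculator-Web-Application-with-Sign-Handling | BinCalc.py | bin_c1
-- ===== SOURCE A (Python) =====
-- def bin_c1(Num):
--     Num = Num[::-1]
--     Num = list(Num)
--     for i in range(len(Num)):
--         if Num[i] == "1":
--             Num[i] = "0"
--         elif Num[i] == "0":
--             Num[i] = "1"
--         temp = "".join(Num)
--         temp = temp[::-1]
--         return temp
-- ===== SOURCE B (Python) =====
-- def bin_c1(Num):
--     last = Num[-1]
--     if last == "1":
--         last = "0"
--     elif last == "0":
--         last = "1"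
--     return Num[:-1] + last
-- ===== Notes on version B (the rewrite author's own statement) =====
-- stated objective: simpler
-- what changed: A reverses the string, converts it to a list and runs a loop whose body returns on its first iteration; B flips the last character directly with Num[-1] and Num[:-1], no reversal, no list, no loop.
-- outside the precondition, e.g. on bin_c1(''): A returns None, B raises IndexError
import Mathlib
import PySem

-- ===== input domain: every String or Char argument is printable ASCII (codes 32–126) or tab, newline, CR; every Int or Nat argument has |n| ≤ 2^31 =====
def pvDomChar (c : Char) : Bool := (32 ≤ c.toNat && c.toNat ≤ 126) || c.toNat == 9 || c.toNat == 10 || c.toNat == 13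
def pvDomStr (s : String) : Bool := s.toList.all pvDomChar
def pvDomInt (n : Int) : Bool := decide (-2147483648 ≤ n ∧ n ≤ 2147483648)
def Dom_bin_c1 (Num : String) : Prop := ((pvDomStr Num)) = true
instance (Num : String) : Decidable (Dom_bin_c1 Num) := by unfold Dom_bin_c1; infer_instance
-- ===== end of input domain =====

-- B flips the last character of the string directly (no reversal, no list, no loop); simpler than A.

-- ===== PORT A =====
-- the for-loop of A returns unconditionally in its first iteration, so it is one
-- guarded step over index 0; if the list is empty the loop falls through (Python: None)
def bin_c1_loopA (l : List Char) (i : Nat) : Option String :=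
  if h : i < l.length then
    let l' := if l[i] = '1' then l.set i '0'
              else if l[i] = '0' then l.set i '1'
              else l
    let temp := String.ofList l'                                    -- "".join(Num)
    some ((PySem.Str.slice? temp none none (-1)).getD "")           -- temp[::-1] (step ≠ 0, never none)
  else none

def bin_c1 (Num : String) : String :=
  let numRev := (PySem.Str.slice? Num none none (-1)).getD ""       -- Num[::-1] (step ≠ 0, never none)
  let l := numRev.toList                                            -- list(Num)
  (bin_c1_loopA l 0).getD ""                                        -- '' stands for Python's None, excluded by Pre_

-- ===== PORT B =====
def bin_c1_alt (Num : String) : String :=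
  match PySem.Str.pyGet? Num (-1) with                              -- Num[-1]; none = IndexError, outside Pre_
  | none => ""
  | some last =>
    let last := if last = '1' then '0' else if last = '0' then '1' else last
    PySem.Str.slice Num none (some (-1)) ++ String.ofList [last]    -- Num[:-1] + last

-- ===== PRECONDITION & SPEC =====
-- Pre_ excludes the empty string, on which A returns None (not a str) and B raises IndexError.
def Pre_bin_c1 (Num : String) : Prop := Num ≠ ""
instance (Num : String) : Decidable (Pre_bin_c1 Num) := by unfold Pre_bin_c1; infer_instance
def pvWitness_bin_c1 : String := "101"

def Spec_bin_c1 (Num : String) (out : String) : Prop := out = bin_c1_alt Num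
instance (Num : String) (out : String) : Decidable (Spec_bin_c1 Num out) := by unfold Spec_bin_c1; infer_instance

-- ===== CLAIM (what is proved, stated in full; the proofs are below) =====
def Claim_equal_bin_c1 : Prop := ∀ (Num : String), Dom_bin_c1 Num → Pre_bin_c1 Num → Spec_bin_c1 Num (bin_c1 Num)

-- ===== LEMMAS AND PROOFS =====

theorem bin_c1_eq (Num : String) (h : Num ≠ "") : bin_c1 Num = bin_c1_alt Num := by
  have hl : Num.toList ≠ [] := by
    intro hnil; apply h; apply String.toList_inj.mp; simpa using hnil
  cases hrev : Num.toList.reverse with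
  | nil => exact absurd (by simpa using hrev) hl
  | cons c t =>
    have hlast : Num.toList.getLast? = some c := by
      rw [← List.head?_reverse, hrev]; rfl
    have hfull : Num.toList = t.reverse ++ [c] := by
      have := congrArg List.reverse hrev; simpa using this
    have hdrop : Num.toList.dropLast = t.reverse := by
      rw [hfull]; simp
    apply String.toList_inj.mp
    simp only [bin_c1, bin_c1_alt, bin_c1_loopA, PySem.Str.slice?_none_none_neg_one,
      Option.getD_some, String.toList_ofList, hrev]
    rw [PySem.Str.pyGet?, PySem.Chars.pyGet?.eq_def, PySem.List.pyGet?_neg_one, hlast]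
    simp only [String.toList_append, String.toList_ofList, PySem.Str.slice_to_neg_one, hdrop]
    split_ifs <;> simp_all

-- ===== VERDICT (by name: the statement is the Claim_ definition above) =====
theorem bin_c1_spec : Claim_equal_bin_c1 := by
  intro Num _ hpre
  exact bin_c1_eq Num hpre
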